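-- pv_equiv track=rewrite | github.com/abrahamshimekt/Data-Structure-and-Algorithm-Problems-Python3-Solution | sliding_window/max_purchased.py | maxPurchased
-- ===== SOURCE A (Python) =====
-- def maxPurchased(cost1,cost2,budget):
--     sum_ = 0
--     k = 0
--     i,j= 0,1
--     while j <= len(cost1):
--         sum_ = sum_ + cost2[j-1]
--         if max(cost1[i:j]) + (sum_)*(j-i) <= budget:
--             k = max(k,j-i)
--             j +=1
--         else:
--             sum_ = sum_ - cost2[i]
--             i +=1
--             j +=1
--     return k
-- ===== SOURCE B (Python) =====
-- def maxPurchased(cost1, cost2, budget):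
--     # Same window policy as the quadratic original, but the window maximum of
--     # cost1 comes from a monotonic deque and the cost2 window sum is kept
--     # incrementally, so there is no per-step slice scan.
--     n = len(cost1)
--     dq = []              # indices in the window, cost1 values strictly decreasing
--     sum_ = 0
--     k = 0
--     i = 0
--     for j in range(1, n + 1):
--         v = cost1[j - 1]
--         while dq and cost1[dq[-1]] <= v:
--             dq.pop()
--         dq.append(j - 1)
--         while dq[0] < i:
--             dq.pop(0)
--         sum_ += cost2[j - 1]
--         if cost1[dq[0]] + sum_ * (j - i) <= budget:
--             k = max(k, j - i)
--         else:
--             sum_ -= cost2[i]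
--             i += 1
--     return k
-- ===== Notes on version B (the rewrite author's own statement) =====
-- stated objective: faster
-- what changed: replaces the per-step max(cost1[i:j]) slice scan with a monotonic deque of candidate indices and keeps the cost2 window sum incrementally, so each element is pushed and popped at most once
import Mathlib
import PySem

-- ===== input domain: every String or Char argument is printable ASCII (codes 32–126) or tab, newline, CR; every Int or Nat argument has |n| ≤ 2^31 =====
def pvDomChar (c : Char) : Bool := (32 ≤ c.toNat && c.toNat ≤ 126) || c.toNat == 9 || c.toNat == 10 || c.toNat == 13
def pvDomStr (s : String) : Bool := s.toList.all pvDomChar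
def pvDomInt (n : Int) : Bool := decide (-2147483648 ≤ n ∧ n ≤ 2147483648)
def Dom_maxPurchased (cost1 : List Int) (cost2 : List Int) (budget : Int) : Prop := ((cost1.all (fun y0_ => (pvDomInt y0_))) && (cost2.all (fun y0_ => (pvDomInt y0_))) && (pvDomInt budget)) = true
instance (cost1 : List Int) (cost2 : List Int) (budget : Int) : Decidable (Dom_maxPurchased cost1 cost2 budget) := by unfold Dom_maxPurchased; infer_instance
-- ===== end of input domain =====

-- B replaces A's per-step max(cost1[i:j]) slice scan by a monotonic deque (and an
-- incremental cost2 window sum): an asymptotic speed-up, identical return value.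

-- ===== PORT A =====
-- the while loop of A: runs exactly len(cost1) iterations (j goes 1..n, +1 each turn),
-- ported as fuel recursion with fuel = number of remaining iterations
def maxPLoopA (cost1 cost2 : List Int) (budget : Int) : Nat → Int → Int → Int → Int → Int
  | 0, _, _, _, k => k
  | fuel+1, i, j, sum_, k =>
    let sum' := sum_ + PySem.List.pyGetD cost2 (j-1) 0
    if (PySem.List.max? (PySem.List.slice cost1 (some i) (some j)) (fun y => y)).getD 0
         + sum' * (j - i) ≤ budget then
      maxPLoopA cost1 cost2 budget fuel i (j+1) sum' (max k (j-i))
    else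
      maxPLoopA cost1 cost2 budget fuel (i+1) (j+1) (sum' - PySem.List.pyGetD cost2 i 0) k

def maxPurchased (cost1 : List Int) (cost2 : List Int) (budget : Int) : Int :=
  maxPLoopA cost1 cost2 budget cost1.length 0 1 0 0

-- ===== PORT B =====
-- "while dq and cost1[dq[-1]] <= v: dq.pop()"  (pop from the back while value ≤ v)
def popBackB (cost1 : List Int) (v : Int) : List Int → List Int
  | [] => []
  | t :: rest =>
    match popBackB cost1 v rest with
    | [] => if PySem.List.pyGetD cost1 t 0 ≤ v then [] else [t]
    | r => t :: r

-- "while dq[0] < i: dq.pop(0)"  (pop from the front while index < i)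
def popFrontB (i : Int) : List Int → List Int
  | [] => []
  | t :: rest => if t < i then popFrontB i rest else t :: rest

def maxPLoopB (cost1 cost2 : List Int) (budget : Int) : Nat → List Int → Int → Int → Int → Int → Int
  | 0, _, _, _, _, k => k
  | fuel+1, dq, i, j, sum_, k =>
    let v := PySem.List.pyGetD cost1 (j-1) 0
    let dq2 := popFrontB i (popBackB cost1 v dq ++ [j-1])
    let sum' := sum_ + PySem.List.pyGetD cost2 (j-1) 0
    if PySem.List.pyGetD cost1 (PySem.List.pyGetD dq2 0 0) 0 + sum' * (j - i) ≤ budget then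
      maxPLoopB cost1 cost2 budget fuel dq2 i (j+1) sum' (max k (j-i))
    else
      maxPLoopB cost1 cost2 budget fuel dq2 (i+1) (j+1) (sum' - PySem.List.pyGetD cost2 i 0) k

def maxPurchased_alt (cost1 : List Int) (cost2 : List Int) (budget : Int) : Int :=
  maxPLoopB cost1 cost2 budget cost1.length [] 0 1 0 0

-- ===== PRECONDITION & SPEC =====
-- Pre_ excludes exactly the inputs where the Python A raises (IndexError on
-- cost2[j-1] once j-1 reaches len(cost2) < len(cost1)); B raises there too.
def Pre_maxPurchased (cost1 : List Int) (cost2 : List Int) (budget : Int) : Prop :=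
  cost1.length ≤ cost2.length

instance (cost1 : List Int) (cost2 : List Int) (budget : Int) : Decidable (Pre_maxPurchased cost1 cost2 budget) := by unfold Pre_maxPurchased; infer_instance

def pvWitness_maxPurchased : List Int × List Int × Int := ([2, 1, 3], [1, 2, 1], 10)

def Spec_maxPurchased (cost1 : List Int) (cost2 : List Int) (budget : Int) (out : Int) : Prop := out = maxPurchased_alt cost1 cost2 budget
instance (cost1 : List Int) (cost2 : List Int) (budget : Int) (out : Int) : Decidable (Spec_maxPurchased cost1 cost2 budget out) := by unfold Spec_maxPurchased; infer_instance

-- ===== CLAIM (what is proved, stated in full; the proofs are below) =====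
def Claim_equal_maxPurchased : Prop := ∀ (cost1 : List Int) (cost2 : List Int) (budget : Int), Dom_maxPurchased cost1 cost2 budget → Pre_maxPurchased cost1 cost2 budget → Spec_maxPurchased cost1 cost2 budget (maxPurchased cost1 cost2 budget)

-- ===== LEMMAS AND PROOFS =====

-- value at index t of cost1 (all indices used are in range; default never reached there)
def valAt (c : List Int) (t : Int) : Int := PySem.List.pyGetD c t 0

-- canonical monotonic deque of the first m elements: indices that strictly dominate
-- every later index < m
def sufMax (c : List Int) : Nat → List Int
  | 0 => []
  | m+1 => (sufMax c m).filter (fun t => decide (valAt c (m : Int) < valAt c t)) ++ [(m : Int)]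

lemma mem_sufMax (c : List Int) : ∀ (m : Nat) (t : Int),
    t ∈ sufMax c m ↔ 0 ≤ t ∧ t < (m : Int) ∧
      ∀ u : Nat, t < (u : Int) → u < m → valAt c (u : Int) < valAt c t := by
  intro m
  induction m with
  | zero => intro t; simp [sufMax]
  | succ m ih =>
    intro t
    simp only [sufMax, List.mem_append, List.mem_filter, List.mem_singleton, ih,
      decide_eq_true_eq]
    constructor
    · rintro (⟨⟨h0, hlt, hall⟩, hv⟩ | rfl)
      · refine ⟨h0, by push_cast; omega, ?_⟩
        intro u hu hum
        by_cases hum' : u < m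
        · exact hall u hu hum'
        · have : (u : Int) = (m : Int) := by push_cast; omega
          rwa [this]
      · refine ⟨by positivity, by push_cast; omega, ?_⟩
        intro u hu hum
        have : (m : Int) < (u : Int) := hu
        have : m < u := by exact_mod_cast this
        omega
    · rintro ⟨h0, hlt, hall⟩
      by_cases ht : t = (m : Int)
      · right; exact ht
      · left
        have htm : t < (m : Int) := by
          have : t < (m : Int) + 1 := by push_cast at hlt ⊢; omega
          omega
        refine ⟨⟨h0, htm, fun u hu hum => hall u hu (by omega)⟩, hall m htm (by omega)⟩

lemma sufMax_mem_bound (c : List Int) : ∀ (m : Nat) (t : Int), t ∈ sufMax c m → 0 ≤ t ∧ t < (m : Int) := by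
  intro m
  induction m with
  | zero => intro t; simp [sufMax]
  | succ m ih =>
    intro t ht
    simp only [sufMax, List.mem_append, List.mem_filter, List.mem_singleton] at ht
    rcases ht with ⟨h1, _⟩ | rfl
    · have := ih t h1; push_cast; omega
    · refine ⟨by positivity, by push_cast; omega⟩


lemma sufMax_pairwise (c : List Int) (m : Nat) :
    (sufMax c m).Pairwise (fun a b => a < b ∧ valAt c b < valAt c a) := by
  induction m with
  | zero => simp [sufMax]
  | succ m ih =>
    rw [sufMax, List.pairwise_append]
    refine ⟨ih.filter _, List.pairwise_singleton _ _, ?_⟩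
    intro a ha b hb
    simp only [List.mem_singleton] at hb
    subst hb
    simp only [List.mem_filter, decide_eq_true_eq] at ha
    exact ⟨(sufMax_mem_bound c m a ha.1).2, ha.2⟩


lemma popBackB_eq_filter (c : List Int) (v : Int) :
    ∀ l : List Int, l.Pairwise (fun a b => valAt c b < valAt c a) →
      popBackB c v l = l.filter (fun t => decide (v < valAt c t)) := by
  intro l
  induction l with
  | nil => intro _; simp [popBackB]
  | cons t rest ih =>
    intro hp
    rw [List.pairwise_cons] at hp
    have hrest := ih hp.2
    by_cases hemp : rest.filter (fun t => decide (v < valAt c t)) = []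
    · have hall : ∀ b ∈ rest, valAt c b ≤ v := by
        intro b hb
        by_contra hc
        have : b ∈ rest.filter (fun t => decide (v < valAt c t)) := by
          simp [List.mem_filter, hb]; omega
        simp [hemp] at this
      simp only [popBackB, hrest, hemp, List.filter_cons]
      by_cases htv : valAt c t ≤ v
      · have h2 : ¬ v < valAt c t := by omega
        simp [valAt] at htv h2 ⊢
        simp [htv]
      · have h2 : v < valAt c t := by omega
        simp [valAt] at htv h2 ⊢
        simp [htv]
    · have hvt : v < valAt c t := by
        rcases List.exists_mem_of_ne_nil _ hemp with ⟨b, hb⟩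
        have hb' := List.mem_filter.mp hb
        have := hp.1 b (List.mem_of_mem_filter hb)
        simp only [decide_eq_true_eq] at hb'
        omega
      simp only [popBackB, hrest]
      rcases h : rest.filter (fun t => decide (v < valAt c t)) with _ | ⟨x, xs⟩
      · exact absurd h hemp
      · simp [hvt, h]

lemma popFrontB_eq_filter (i : Int) :
    ∀ l : List Int, l.Pairwise (· < ·) →
      popFrontB i l = l.filter (fun t => decide (i ≤ t)) := by
  intro l
  induction l with
  | nil => intro _; simp [popFrontB]
  | cons t rest ih =>
    intro hp
    rw [List.pairwise_cons] at hp
    by_cases ht : t < i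
    · have : ¬ i ≤ t := by omega
      simp [popFrontB, ht, this, ih hp.2]
    · have hle : i ≤ t := by omega
      have : rest.filter (fun t => decide (i ≤ t)) = rest :=
        List.filter_eq_self.mpr (fun b hb => by
          have := hp.1 b hb; simp; omega)
      simp [popFrontB, ht, hle, this]

lemma valAt_eq_getElem (c : List Int) (u : Nat) (hu : u < c.length) :
    valAt c (u : Int) = getElem c u hu := by
  rw [valAt, PySem.List.pyGetD_natCast, List.getD_eq_getElem c 0 hu]


lemma head_filter_eq_max (c : List Int) (iN jN : Nat) (hij : iN < jN) (hlen : jN ≤ c.length) :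
    (PySem.List.max? (PySem.List.slice c (some (iN : Int)) (some (jN : Int))) (fun y => y)).getD 0
      = valAt c (PySem.List.pyGetD ((sufMax c jN).filter (fun t => decide ((iN : Int) ≤ t))) 0 0) := by
  set L := (sufMax c jN).filter (fun t => decide ((iN : Int) ≤ t)) with hL
  have hmemL : ((jN - 1 : Nat) : Int) ∈ L := by
    rw [hL, List.mem_filter]
    refine ⟨(mem_sufMax c jN _).mpr ⟨by positivity, by push_cast; omega, ?_⟩, by simp; omega⟩
    intro u hu hum
    exfalso
    have : jN - 1 < u := by exact_mod_cast hu
    omega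
  rcases hLc : L with _ | ⟨hd, tl⟩
  · rw [hLc] at hmemL; simp at hmemL
  have hhd : hd ∈ L := by rw [hLc]; exact List.mem_cons_self
  have hhd' := List.mem_filter.mp (hL ▸ hhd)
  obtain ⟨hhd0, hhdj, _⟩ := (mem_sufMax c jN hd).mp hhd'.1
  have hpairL : L.Pairwise (fun a b => a < b ∧ valAt c b < valAt c a) :=
    (sufMax_pairwise c jN).filter _
  have htl : ∀ b ∈ tl, valAt c b < valAt c hd := by
    rw [hLc] at hpairL
    exact fun b hb => ((List.pairwise_cons.mp hpairL).1 b hb).2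
  have key : ∀ d u : Nat, iN ≤ u → u < jN → jN - u ≤ d → valAt c (u : Int) ≤ valAt c hd := by
    intro d
    induction d with
    | zero => intro u _ hu2 hd0; omega
    | succ d ih =>
      intro u hu1 hu2 _
      by_cases hmem : (u : Int) ∈ sufMax c jN
      · have huL : (u : Int) ∈ L := by
          rw [hL, List.mem_filter]; exact ⟨hmem, by simp; exact_mod_cast hu1⟩
        rw [hLc, List.mem_cons] at huL
        rcases huL with heq | htl'
        · rw [heq]
        · exact le_of_lt (htl _ htl')
      · rw [mem_sufMax] at hmem
        push_neg at hmem
        obtain ⟨w, hw1, hw2, hw3⟩ := hmem (by positivity) (by exact_mod_cast hu2)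
        have hwu : u < w := by exact_mod_cast hw1
        calc valAt c (u : Int) ≤ valAt c (w : Int) := hw3
          _ ≤ valAt c hd := ih w (by omega) hw2 (by omega)
  have hsl : PySem.List.slice c (some (iN : Int)) (some (jN : Int)) = (c.drop iN).take (jN - iN) :=
    PySem.List.slice_natCast c iN jN
  set sl := (c.drop iN).take (jN - iN) with hsldef
  have hlensl : sl.length = jN - iN := by
    simp [hsldef]; omega
  have hslval : ∀ q : Nat, ∀ h : q < sl.length, getElem sl q h = valAt c ((iN + q : Nat) : Int) := by
    intro q h
    have hq : q < jN - iN := by omega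
    rw [valAt_eq_getElem c (iN + q) (by omega)]
    simp [hsldef]
  rcases hM : PySem.List.max? sl (fun y => y) with _ | M
  · have h0 : sl = [] := (PySem.List.max?_eq_none_iff sl _).mp hM
    rw [h0] at hlensl; simp at hlensl; omega
  have hMmem : M ∈ sl := PySem.List.max?_mem hM
  have hMmax : ∀ y ∈ sl, y ≤ M := by
    have := PySem.List.max?_isMax hM
    simpa using this
  rw [hsl, hM]
  have hhead : PySem.List.pyGetD (hd :: tl) 0 0 = hd := by
    simp [PySem.List.pyGetD_zero_cons]
  rw [hhead]
  simp only [Option.getD_some]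
  obtain ⟨q, hq, hMeq⟩ := List.mem_iff_getElem.mp hMmem
  have h1 : M ≤ valAt c hd := by
    rw [← hMeq, hslval q hq]
    exact key jN (iN + q) (by omega) (by omega) (by omega)
  have h2 : valAt c hd ≤ M := by
    have hNj : hd.toNat < jN := by omega
    have hNi : iN ≤ hd.toNat := by
      have : (iN : Int) ≤ hd := by simpa using hhd'.2
      omega
    have hq2 : hd.toNat - iN < sl.length := by omega
    have := hMmax _ (List.getElem_mem hq2)
    rw [hslval _ hq2] at this
    have heq : ((iN + (hd.toNat - iN) : Nat) : Int) = hd := by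
      push_cast; omega
    rwa [heq] at this
  omega

lemma loopAB_eq (c1 c2 : List Int) (b : Int) :
    ∀ (fuel iN jN lo : Nat) (sum_ k : Int) (dq : List Int),
      fuel + jN = c1.length + 1 → iN < jN → lo ≤ iN → iN ≤ lo + 1 →
      dq = (sufMax c1 (jN - 1)).filter (fun t => decide ((lo : Int) ≤ t)) →
      maxPLoopA c1 c2 b fuel (iN : Int) (jN : Int) sum_ k
        = maxPLoopB c1 c2 b fuel dq (iN : Int) (jN : Int) sum_ k := by
  intro fuel
  induction fuel with
  | zero => intro iN jN lo sum_ k dq _ _ _ _ _; simp [maxPLoopA, maxPLoopB]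
  | succ fuel ih =>
    intro iN jN lo sum_ k dq hfj hij hlo1 hlo2 hdq
    obtain ⟨m, rfl⟩ : ∃ m, jN = m + 1 := ⟨jN - 1, by omega⟩
    simp only [Nat.add_sub_cancel] at hdq
    have hjlen : m + 1 ≤ c1.length := by omega
    have hj1 : ((m + 1 : Nat) : Int) - 1 = (m : Int) := by push_cast; ring
    -- B's push step yields the canonical deque of the first m+1 indices, filtered at lo
    have hdq1 : popBackB c1 (PySem.List.pyGetD c1 (((m + 1 : Nat) : Int) - 1) 0) dq ++ [((m + 1 : Nat) : Int) - 1]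
        = (sufMax c1 (m + 1)).filter (fun t => decide ((lo : Int) ≤ t)) := by
      have hpairv : dq.Pairwise (fun a b => valAt c1 b < valAt c1 a) := by
        rw [hdq]
        exact ((sufMax_pairwise c1 m).filter _).imp (fun h => h.2)
      rw [popBackB_eq_filter c1 _ dq hpairv, hdq, hj1]
      have hstep : sufMax c1 (m + 1)
          = (sufMax c1 m).filter (fun t => decide (valAt c1 (m : Int) < valAt c1 t)) ++ [(m : Int)] := rfl
      rw [hstep, List.filter_append, List.filter_filter, List.filter_filter]
      have hsing : ([(m : Int)].filter (fun t => decide ((lo : Int) ≤ t))) = [(m : Int)] := by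
        have : (lo : Int) ≤ (m : Int) := by push_cast; omega
        simp [this]
      rw [hsing]
      congr 1
      apply List.filter_congr
      intro t _
      rw [Bool.and_comm]
      rfl
    -- B's front-pop step restricts the deque to indices ≥ i
    have hdq2 : popFrontB (iN : Int) ((sufMax c1 (m + 1)).filter (fun t => decide ((lo : Int) ≤ t)))
        = (sufMax c1 (m + 1)).filter (fun t => decide ((iN : Int) ≤ t)) := by
      have hsorted : ((sufMax c1 (m + 1)).filter (fun t => decide ((lo : Int) ≤ t))).Pairwise (· < ·) :=
        ((sufMax_pairwise c1 (m + 1)).filter _).imp (fun h => h.1)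
      rw [popFrontB_eq_filter _ _ hsorted, List.filter_filter]
      apply List.filter_congr
      intro t _
      by_cases h : (iN : Int) ≤ t
      · have h2 : (lo : Int) ≤ t := by
          have : (lo : Int) ≤ (iN : Int) := by exact_mod_cast hlo1
          omega
        simp [h, h2]
      · simp [h]
    -- the two branch conditions coincide (monotonic-deque head = slice maximum)
    have hcond : (PySem.List.max? (PySem.List.slice c1 (some (iN : Int)) (some ((m + 1 : Nat) : Int))) (fun y => y)).getD 0
        = PySem.List.pyGetD c1
            (PySem.List.pyGetD ((sufMax c1 (m + 1)).filter (fun t => decide ((iN : Int) ≤ t))) 0 0) 0 :=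
      head_filter_eq_max c1 iN (m + 1) hij hjlen
    simp only [maxPLoopA, maxPLoopB, hdq1, hdq2, ← hcond]
    have hcast1 : (iN : Int) + 1 = ((iN + 1 : Nat) : Int) := by push_cast; ring
    have hcast2 : ((m + 1 : Nat) : Int) + 1 = ((m + 2 : Nat) : Int) := by push_cast; ring
    split_ifs with hbr
    · rw [hcast2]
      exact ih iN (m + 2) iN _ _ _ (by omega) (by omega) (by omega) (by omega) (by simp)
    · rw [hcast1, hcast2]
      exact ih (iN + 1) (m + 2) iN _ _ _ (by omega) (by omega) (by omega) (by omega) (by simp)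

-- ===== VERDICT (by name: the statement is the Claim_ definition above) =====
theorem maxPurchased_spec : Claim_equal_maxPurchased := by
  intro cost1 cost2 budget _ _
  unfold Spec_maxPurchased maxPurchased maxPurchased_alt
  rcases Nat.eq_zero_or_pos cost1.length with h0 | hpos
  · simp [h0, maxPLoopA, maxPLoopB]
  · have := loopAB_eq cost1 cost2 budget cost1.length 0 1 0 0 0 []
      (by omega) (by omega) (by omega) (by omega) (by simp [sufMax])
    simpa using this
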